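-- pv_equiv track=rewrite | github.com/daveyboyc/cmr | checker/utils.py | format_location_list
-- ===== SOURCE A (Python) =====
-- def normalize(text):
--     """Lowercase and remove all whitespace."""
--     if not isinstance(text, str):
--         return ""
--     return "".join(text.lower().split())
--
-- def format_location_list(locations, components):
--     """
--     Format a list of locations with their components.
--     Returns HTML string.
--     """
--     html = "<ul class='list-unstyled'>"
--
--     for location in sorted(locations):
--         # Add components at this location
--         location_components = [c for c in components if c.get("Location and Post Code", "") == location]
--
--         # Add debug info
--         component_count = len(location_components)
--
--         # Create component ID for first component (for linking)
--         component_id = ""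
--         if location_components and "CMU ID" in location_components[0]:
--             cmu_id = location_components[0].get("CMU ID", "")
--             if cmu_id:
--                 loc_normalized = normalize(location)
--                 component_id = f"{cmu_id}_{loc_normalized}"
--
--         # Format location as a blue link if we have a component ID
--         location_html = location
--         if component_id:
--             location_html = f'<a href="/component/{component_id}/" style="color: blue; text-decoration: underline;">{location}</a>'
--
--         html += f"""
--             <li class="mb-2">
--                 <strong>{location_html}</strong> <span class="text-muted">({component_count} components)</span>
--                 <ul class="ms-3">
--         """
--
--         # Add debug
--         if not location_components:
--             html += f"""
--                 <li><i>No components found for this location</i></li>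
--             """
--             continue
--
--         for component in location_components:
--             desc = component.get("Description of CMU Components", "N/A")
--             tech = component.get("Generating Technology Class", "")
--             auction = component.get("Auction Name", "")
--             delivery_year = component.get("Delivery Year", "")
--
--             # Extract auction year and type
--             auction_year = ""
--             auction_type = ""
--             if auction:
--                 # Parse auction info - example format: "T-4 2024/25"
--                 parts = auction.split()
--                 if len(parts) >= 1:
--                     auction_type = parts[0]  # T-1, T-4, etc.
--                 if len(parts) >= 2:
--                     auction_year = parts[1]  # 2024/25, etc.
--
--             # Create badges
--             auction_badge = ""
--             if auction_type:
--                 badge_color = "info" if auction_type == "T-4" else "warning" if auction_type == "T-1" else "secondary"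
--                 auction_badge = f'<span class="badge bg-{badge_color} ms-1">{auction_type}</span>'
--
--             year_info = f'<span class="text-muted ms-1">(Auction: {auction_year}, Delivery: {delivery_year})</span>' if auction_year else ""
--
--             html += f"""
--                 <li><i>{desc}</i>{f" - {tech}" if tech else ""} {auction_badge} {year_info}</li>
--             """
--
--         html += """
--                 </ul>
--             </li>
--         """
--
--     html += "</ul>"
--     return html
-- ===== SOURCE B (Python) =====
-- # B: one-pass grouping of components by location into a dict, then a single
-- # render pass over the sorted locations that emits flat HTML fragments joined once.
--
-- _BADGE_COLORS = {"T-4": "info", "T-1": "warning"}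
--
-- _PAGE_OPEN = "<ul class='list-unstyled'>"
-- _PAGE_CLOSE = "</ul>"
-- _LOC_OPEN = "\n            <li class=\"mb-2\">\n                <strong>"
-- _LOC_MID = "</strong> <span class=\"text-muted\">("
-- _LOC_TAIL = " components)</span>\n                <ul class=\"ms-3\">\n        "
-- _EMPTY_NOTE = "\n                <li><i>No components found for this location</i></li>\n            "
-- _LOC_CLOSE = "\n                </ul>\n            </li>\n        "
--
--
-- def normalize(text):
--     """Lowercase and remove all whitespace."""
--     if not isinstance(text, str):
--         return ""
--     return "".join(text.lower().split())
--
--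
-- def _component_html(c):
--     desc = c.get("Description of CMU Components", "N/A")
--     tech = c.get("Generating Technology Class", "")
--     words = c.get("Auction Name", "").split()
--     badge = ""
--     if words:
--         badge = '<span class="badge bg-%s ms-1">%s</span>' % (
--             _BADGE_COLORS.get(words[0], "secondary"), words[0])
--     year = ""
--     if len(words) > 1:
--         year = '<span class="text-muted ms-1">(Auction: %s, Delivery: %s)</span>' % (
--             words[1], c.get("Delivery Year", ""))
--     mid = "</i> - %s " % tech if tech else "</i> "
--     return "\n                <li><i>" + desc + mid + badge + " " + year + "</li>\n            "
--
--
-- def _location_parts(loc, group):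
--     cmu = group[0].get("CMU ID", "") if group else ""
--     shown = loc
--     if cmu:
--         shown = ('<a href="/component/%s_%s/" style="color: blue; text-decoration: underline;">%s</a>'
--                  % (cmu, normalize(loc), loc))
--     parts = [_LOC_OPEN, shown, _LOC_MID, str(len(group)), _LOC_TAIL]
--     if group:
--         parts.extend(_component_html(c) for c in group)
--         parts.append(_LOC_CLOSE)
--     else:
--         parts.append(_EMPTY_NOTE)
--     return parts
--
--
-- def format_location_list(locations, components):
--     """
--     Format a list of locations with their components.
--     Returns HTML string.
--     """
--     groups = {}
--     for c in components:
--         groups.setdefault(c.get("Location and Post Code", ""), []).append(c)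
--     parts = [_PAGE_OPEN]
--     for loc in sorted(locations):
--         parts.extend(_location_parts(loc, groups.get(loc, [])))
--     parts.append(_PAGE_CLOSE)
--     return "".join(parts)
-- ===== Notes on version B (the rewrite author's own statement) =====
-- stated objective: faster
-- what changed: B builds a dict grouping components by their location in one pass and renders each sorted location from its group as a flat list of HTML fragments joined once (badge colour via a lookup table), instead of A's rescan of the whole component list for every location with string concatenation.
import Mathlib
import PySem

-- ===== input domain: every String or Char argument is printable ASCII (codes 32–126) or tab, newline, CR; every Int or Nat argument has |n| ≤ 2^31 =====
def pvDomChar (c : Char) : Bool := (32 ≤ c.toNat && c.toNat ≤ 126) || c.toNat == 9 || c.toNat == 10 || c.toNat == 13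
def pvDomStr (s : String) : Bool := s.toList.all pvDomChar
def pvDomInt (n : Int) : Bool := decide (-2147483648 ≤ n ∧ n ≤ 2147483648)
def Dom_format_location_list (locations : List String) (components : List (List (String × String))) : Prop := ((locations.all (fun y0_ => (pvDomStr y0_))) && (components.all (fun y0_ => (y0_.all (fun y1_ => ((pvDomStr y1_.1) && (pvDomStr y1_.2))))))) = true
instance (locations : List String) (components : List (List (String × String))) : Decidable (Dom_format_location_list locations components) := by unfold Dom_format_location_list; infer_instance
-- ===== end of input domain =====

-- B groups the components by location in ONE pass (a dict of lists), then renders the sorted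
-- locations from their groups as a flat list of HTML fragments joined once, instead of A's
-- rescan of the whole component list for every location with string +=.

-- shared helper: the module-level Python 'normalize' (lowercase, drop all whitespace)
def pyNormalize (text : String) : String :=
  PySem.Str.join "" (PySem.Str.split₀ (PySem.Str.lower text))

-- ===== PORT A =====
-- inner loop body of A ('for component in location_components: html += …'); dict .get = first-match lookup
def compStepA (html : String) (component : List (String × String)) : String :=
  let desc := (List.lookup "Description of CMU Components" component).getD "N/A"
  let tech := (List.lookup "Generating Technology Class" component).getD ""
  let auction := (List.lookup "Auction Name" component).getD ""
  let delivery_year := (List.lookup "Delivery Year" component).getD ""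
  let ty : String × String :=
    if auction ≠ "" then
      let parts := PySem.Str.split₀ auction
      ((match parts with | [] => "" | t :: _ => t),
       (match parts with | _ :: y :: _ => y | _ => ""))
    else ("", "")
  let auction_type := ty.1
  let auction_year := ty.2
  let auction_badge :=
    if auction_type ≠ "" then
      let badge_color := if auction_type == "T-4" then "info" else if auction_type == "T-1" then "warning" else "secondary"
      "<span class=\"badge bg-" ++ badge_color ++ " ms-1\">" ++ auction_type ++ "</span>"
    else ""
  let year_info := if auction_year ≠ "" then "<span class=\"text-muted ms-1\">(Auction: " ++ auction_year ++ ", Delivery: " ++ delivery_year ++ ")</span>" else ""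
  html ++ ("\n                <li><i>" ++ desc ++ "</i>" ++ (if tech ≠ "" then " - " ++ tech else "") ++ " " ++ auction_badge ++ " " ++ year_info ++ "</li>\n            ")

-- outer loop body of A ('for location in sorted(locations): …')
def stepA (components : List (List (String × String))) (html : String) (location : String) : String :=
  let location_components := components.filter (fun c => ((List.lookup "Location and Post Code" c).getD "") == location)
  let component_count := location_components.length
  let component_id :=
    match location_components with
    | [] => ""
    | c0 :: _ =>
      if (List.lookup "CMU ID" c0).isSome then
        let cmu_id := (List.lookup "CMU ID" c0).getD ""
        if cmu_id ≠ "" then cmu_id ++ "_" ++ pyNormalize location else ""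
      else ""
  let location_html :=
    if component_id ≠ "" then
      "<a href=\"/component/" ++ component_id ++ "/\" style=\"color: blue; text-decoration: underline;\">" ++ location ++ "</a>"
    else location
  let html := html ++ ("\n            <li class=\"mb-2\">\n                <strong>" ++ location_html ++ "</strong> <span class=\"text-muted\">(" ++ PySem.Int.toStr (component_count : Int) ++ " components)</span>\n                <ul class=\"ms-3\">\n        ")
  if location_components.isEmpty then
    html ++ "\n                <li><i>No components found for this location</i></li>\n            "
  else
    (location_components.foldl compStepA html) ++ "\n                </ul>\n            </li>\n        "

def format_location_list (locations : List String) (components : List (List (String × String))) : String :=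
  ((PySem.List.sorted locations (fun x => x) false).foldl (stepA components) "<ul class='list-unstyled'>") ++ "</ul>"

-- ===== PORT B =====
-- Source B module constants: the fixed HTML fragments and the badge-colour table
def pvBadgeColors : PySem.Dict String String := PySem.Dict.ofList [("T-4", "info"), ("T-1", "warning")]
def pvPageOpen : String := "<ul class='list-unstyled'>"
def pvPageClose : String := "</ul>"
def pvLocOpen : String := "\n            <li class=\"mb-2\">\n                <strong>"
def pvLocMid : String := "</strong> <span class=\"text-muted\">("
def pvLocTail : String := " components)</span>\n                <ul class=\"ms-3\">\n        "
def pvEmptyNote : String := "\n                <li><i>No components found for this location</i></li>\n            "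
def pvLocClose : String := "\n                </ul>\n            </li>\n        "

-- Source B _component_html (dict .get ported as PySem.Dict on the association list)
def componentHtmlB (c : List (String × String)) : String :=
  let desc := (PySem.Dict.mk c).getD "Description of CMU Components" "N/A"
  let tech := (PySem.Dict.mk c).getD "Generating Technology Class" ""
  let words := PySem.Str.split₀ ((PySem.Dict.mk c).getD "Auction Name" "")
  let badge := match words with
    | [] => ""
    | w :: _ => "<span class=\"badge bg-" ++ pvBadgeColors.getD w "secondary" ++ " ms-1\">" ++ w ++ "</span>"
  let year := match words with
    | _ :: y :: _ => "<span class=\"text-muted ms-1\">(Auction: " ++ y ++ ", Delivery: " ++ (PySem.Dict.mk c).getD "Delivery Year" "" ++ ")</span>"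
    | _ => ""
  let mid := if tech ≠ "" then "</i> - " ++ tech ++ " " else "</i> "
  "\n                <li><i>" ++ desc ++ mid ++ badge ++ " " ++ year ++ "</li>\n            "

-- Source B _location_parts: the flat fragment list for one location
def locPartsB (loc : String) (group : List (List (String × String))) : List String :=
  let cmu := match group with | [] => "" | g0 :: _ => (PySem.Dict.mk g0).getD "CMU ID" ""
  let shown :=
    if cmu ≠ "" then
      "<a href=\"/component/" ++ cmu ++ "_" ++ pyNormalize loc ++ "/\" style=\"color: blue; text-decoration: underline;\">" ++ loc ++ "</a>"
    else loc
  let base := [pvLocOpen, shown, pvLocMid, PySem.Int.toStr (group.length : Int), pvLocTail]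
  match group with
  | [] => base ++ [pvEmptyNote]
  | _ => base ++ group.map componentHtmlB ++ [pvLocClose]

-- Source B grouping loop: groups.setdefault(key, []).append(c)
def groupsB (components : List (List (String × String))) : PySem.Dict String (List (List (String × String))) :=
  components.foldl
    (fun d c => d.modify ((PySem.Dict.mk c).getD "Location and Post Code" "") [] (fun g => g ++ [c]))
    PySem.Dict.empty

def format_location_list_alt (locations : List String) (components : List (List (String × String))) : String :=
  let groups := groupsB components
  PySem.Str.join "" (pvPageOpen ::
    ((PySem.List.sorted locations (fun x => x) false).flatMap (fun loc => locPartsB loc (groups.getD loc []))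
      ++ [pvPageClose]))

-- ===== PRECONDITION & SPEC =====
def Spec_format_location_list (locations : List String) (components : List (List (String × String))) (out : String) : Prop := out = format_location_list_alt locations components
instance (locations : List String) (components : List (List (String × String))) (out : String) : Decidable (Spec_format_location_list locations components out) := by unfold Spec_format_location_list; infer_instance

-- ===== CLAIM (what is proved, stated in full; the proofs are below) =====
def Claim_equal_format_location_list : Prop := ∀ (locations : List String) (components : List (List (String × String))), Dom_format_location_list locations components → Spec_format_location_list locations components (format_location_list locations components)

-- ===== LEMMAS AND PROOFS =====

-- Python .get on a dict literal over an association list is first-match lookup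
theorem mkGetD (l : List (String × String)) (k d : String) :
    (PySem.Dict.mk l).getD k d = (List.lookup k l).getD d := by
  induction l with
  | nil => simp [PySem.Dict.getD_eq_get?_getD, List.lookup]; rfl
  | cons p rest ih =>
    rw [PySem.Dict.getD_eq_get?_getD, PySem.Dict.get?_mk_cons]
    rw [PySem.Dict.getD_eq_get?_getD] at ih
    by_cases h : p.1 = k
    · simp [h, List.lookup]
    · simp only [List.lookup]
      have h2 : (k == p.1) = false := by simp [beq_eq_false_iff_ne]; exact fun e => h e.symm
      have h3 : (p.1 == k) = false := by simp [beq_eq_false_iff_ne]; exact h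
      simp [h2, h3, ih]

theorem badge_eq (w : String) : pvBadgeColors.getD w "secondary" =
    if w == "T-4" then "info" else if w == "T-1" then "warning" else "secondary" := by
  by_cases h4 : w = "T-4"
  · subst h4; decide
  · by_cases h1 : w = "T-1"
    · subst h1; decide
    · have e4 : ("T-4" == w) = false := by simpa [beq_eq_false_iff_ne] using fun e => h4 e.symm
      have e1 : ("T-1" == w) = false := by simpa [beq_eq_false_iff_ne] using fun e => h1 e.symm
      have f4 : (w == "T-4") = false := by simpa [beq_eq_false_iff_ne] using h4
      have f1 : (w == "T-1") = false := by simpa [beq_eq_false_iff_ne] using h1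
      have h : pvBadgeColors = PySem.Dict.mk [("T-4", "info"), ("T-1", "warning")] := by decide
      rw [h, PySem.Dict.getD_eq_get?_getD, PySem.Dict.get?_mk_cons, PySem.Dict.get?_mk_cons, e4, e1, f4, f1]
      rfl

-- str.split() produces no empty tokens
theorem split0_go_ne_nil (s cur : List Char) (acc : List (List Char)) (h : ∀ t ∈ acc, t ≠ ([] : List Char)) :
    ∀ t ∈ PySem.Chars.split₀.go s cur acc, t ≠ [] := by
  induction s generalizing cur acc with
  | nil =>
    intro t ht
    simp only [PySem.Chars.split₀.go] at ht
    split at ht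
    · exact h t (List.mem_reverse.mp ht)
    · rcases List.mem_cons.mp (List.mem_reverse.mp ht) with rfl | h2
      · rename_i hc
        intro he
        apply hc
        simpa using congrArg List.isEmpty (congrArg List.reverse he)
      · exact h t h2
  | cons c rest ih =>
    intro t ht
    simp only [PySem.Chars.split₀.go] at ht
    split at ht
    · split at ht
      · exact ih [] acc h t ht
      · refine ih [] (cur.reverse :: acc) ?_ t ht
        intro u hu
        rcases List.mem_cons.mp hu with rfl | hu
        · rename_i hc
          intro he
          apply hc
          simpa using congrArg List.isEmpty (congrArg List.reverse he)
        · exact h _ hu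
    · exact ih (c :: cur) acc h t ht

theorem mem_split₀_ne_empty (s t : String) (h : t ∈ PySem.Str.split₀ s) : t ≠ "" := by
  simp only [PySem.Str.split₀, List.mem_map] at h
  obtain ⟨cs, hcs, rfl⟩ := h
  have hne := split0_go_ne_nil s.toList [] [] (by simp) cs hcs
  intro he
  apply hne
  have : (String.ofList cs).toList = ("" : String).toList := congrArg String.toList he
  simpa using this

-- string-append bookkeeping
theorem sapp (a b c : String) (h : a ++ b = c) (s : String) : a ++ (b ++ s) = c ++ s := by
  rw [← String.append_assoc, h]

theorem join_empty_cons (a : String) (l : List String) :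
    PySem.Str.join "" (a :: l) = a ++ PySem.Str.join "" l := by
  apply String.toList_inj.mp
  have h : ∀ (xs : List (List Char)) (x : List Char),
      List.intercalate [] (x :: xs) = x ++ List.intercalate [] xs := by
    intro xs
    induction xs with
    | nil => intro x; simp [List.intercalate]
    | cons b t ih => intro x; simp [List.intercalate, List.intersperse] at *
  simp [PySem.Str.join, PySem.Chars.join, String.toList_append, h]

theorem join_empty_append (l m : List String) :
    PySem.Str.join "" (l ++ m) = PySem.Str.join "" l ++ PySem.Str.join "" m := by
  induction l with
  | nil =>
    simp only [List.nil_append]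
    have : PySem.Str.join "" ([] : List String) = "" := rfl
    rw [this]
    exact String.empty_append.symm
  | cons a t ih => simp [join_empty_cons, ih, String.append_assoc]

theorem join_empty_flatMap {α : Type} (xs : List α) (f : α → List String) :
    PySem.Str.join "" (xs.flatMap f) =
      PySem.Str.join "" (xs.map (fun x => PySem.Str.join "" (f x))) := by
  induction xs with
  | nil => rfl
  | cons a t ih => simp [List.flatMap_cons, join_empty_append, join_empty_cons, ih]

theorem foldl_append_join {α : Type} (xs : List α) (f : α → String) (init : String) :
    xs.foldl (fun s x => s ++ f x) init = init ++ PySem.Str.join "" (xs.map f) := by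
  induction xs generalizing init with
  | nil => simp [PySem.Str.join, PySem.Chars.join, List.intercalate]
  | cons a t ih => simp [ih, join_empty_cons, String.append_assoc]

-- B's grouping dict looked up at a location IS A's filter of the component list
theorem groupsB_getD (components : List (List (String × String))) (loc : String) :
    (groupsB components).getD loc [] =
      components.filter (fun c => ((List.lookup "Location and Post Code" c).getD "") == loc) := by
  have h0 : groupsB components
      = components.foldl (fun d c => d.modify ((List.lookup "Location and Post Code" c).getD "") [] (fun g => g ++ [c])) PySem.Dict.empty := by
    unfold groupsB
    congr 1
    funext d c
    rw [mkGetD]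
  have h1 : groupsB components
      = (components.map (fun c => (((List.lookup "Location and Post Code" c).getD ""), c))).foldl
        (fun d p => d.modify p.1 [] (fun g => g ++ [p.2])) PySem.Dict.empty := by
    rw [h0, List.foldl_map]
  rw [h1, PySem.Dict.getD_foldl_modify_append]
  simp [List.filter_map, Function.comp_def]

-- one component: A's appended chunk = B's fragment
theorem compStepA_eq (html : String) (c : List (String × String)) :
    compStepA html c = html ++ componentHtmlB c := by
  unfold compStepA componentHtmlB
  simp only [mkGetD]
  cases hw : PySem.Str.split₀ ((List.lookup "Auction Name" c).getD "") with
  | nil =>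
    by_cases ha : (List.lookup "Auction Name" c).getD "" = ""
    · simp only [ha, ne_eq, not_true_eq_false, if_false, hw]
      by_cases ht : (List.lookup "Generating Technology Class" c).getD "" = ""
      · simp only [ht, ne_eq, not_true, not_true_eq_false, if_false, ite_false]
        simp only [String.append_assoc]
        rw [sapp "</i>" "" "</i>" rfl, sapp "</i>" " " "</i> " rfl]
      · simp only [ne_eq, ht, not_false_eq_true, if_true]
        simp only [not_true, not_true_eq_false, if_false, ite_false, String.append_assoc]
        rw [sapp "</i>" " - " "</i> - " rfl]
    · simp only [ne_eq, ha, not_false_eq_true, if_true, hw]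
      by_cases ht : (List.lookup "Generating Technology Class" c).getD "" = ""
      · simp only [ht, ne_eq, not_true, not_true_eq_false, if_false, ite_false]
        simp only [String.append_assoc]
        rw [sapp "</i>" "" "</i>" rfl, sapp "</i>" " " "</i> " rfl]
      · simp only [ne_eq, ht, not_false_eq_true, if_true]
        simp only [not_true, not_true_eq_false, if_false, ite_false, String.append_assoc]
        rw [sapp "</i>" " - " "</i> - " rfl]
  | cons w ws =>
    have ha : (List.lookup "Auction Name" c).getD "" ≠ "" := by
      intro he
      rw [he] at hw
      exact List.cons_ne_nil w ws hw.symm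
    have hwne : w ≠ "" := mem_split₀_ne_empty _ w (hw ▸ List.mem_cons_self)
    simp only [ne_eq, ha, not_false_eq_true, if_true, hw, badge_eq, hwne]
    cases ws with
    | nil =>
      simp only [ne_eq, not_true_eq_false, if_false]
      by_cases ht : (List.lookup "Generating Technology Class" c).getD "" = ""
      · simp only [ht, ne_eq, not_true, not_true_eq_false, if_false, ite_false]
        simp only [String.append_assoc]
        rw [sapp "</i>" "" "</i>" rfl, sapp "</i>" " " "</i> " rfl]
      · simp only [ne_eq, ht, not_false_eq_true, if_true]
        simp only [not_true, not_true_eq_false, if_false, ite_false, String.append_assoc]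
        rw [sapp "</i>" " - " "</i> - " rfl]
    | cons y ys =>
      have hyne : y ≠ "" := mem_split₀_ne_empty _ y (hw ▸ List.mem_cons_of_mem w List.mem_cons_self)
      simp only [ne_eq, hyne, not_false_eq_true, if_true]
      by_cases ht : (List.lookup "Generating Technology Class" c).getD "" = ""
      · simp only [ht, ne_eq, not_true, not_true_eq_false, if_false, ite_false]
        simp only [String.append_assoc]
        rw [sapp "</i>" "" "</i>" rfl, sapp "</i>" " " "</i> " rfl]
      · simp only [ne_eq, ht, not_false_eq_true, if_true]
        simp only [not_true, not_true_eq_false, if_false, ite_false, String.append_assoc]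
        rw [sapp "</i>" " - " "</i> - " rfl]

-- one location: A's appended chunk = the join of B's fragment list
theorem stepA_eq (components : List (List (String × String))) (html location : String) :
    stepA components html location =
      html ++ PySem.Str.join "" (locPartsB location ((groupsB components).getD location [])) := by
  rw [groupsB_getD]
  unfold stepA locPartsB
  have hfold : ∀ (l : List (List (String × String))) (h : String),
      l.foldl compStepA h = h ++ PySem.Str.join "" (l.map componentHtmlB) := by
    intro l h
    rw [show compStepA = fun s c => s ++ componentHtmlB c from funext fun s => funext fun c => compStepA_eq s c]
    exact foldl_append_join l componentHtmlB h
  cases hlc : components.filter (fun c => ((List.lookup "Location and Post Code" c).getD "") == location) with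
  | nil =>
    simp only [List.isEmpty_nil, if_true, List.length_nil, mkGetD]
    simp only [join_empty_cons, join_empty_append, pvLocOpen, pvLocMid, pvLocTail, pvEmptyNote]
    simp only [ne_eq, not_true_eq_false, if_false]
    have hj : PySem.Str.join "" ([] : List String) = "" := rfl
    simp [join_empty_cons, hj, String.append_assoc, String.append_empty]
  | cons c0 rest =>
    simp only [mkGetD, List.isEmpty_cons, Bool.false_eq_true, if_false, hfold]
    simp only [List.append_assoc, join_empty_append, join_empty_cons]
    have hj : PySem.Str.join "" ([] : List String) = "" := rfl
    by_cases hs : (List.lookup "CMU ID" c0).isSome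
    · by_cases hc : (List.lookup "CMU ID" c0).getD "" = ""
      · simp only [hs, if_true, hc, ne_eq, not_true_eq_false, if_false]
        simp [pvLocOpen, pvLocMid, pvLocTail, pvLocClose, join_empty_cons, hj, String.append_assoc, String.append_empty]
      · have hid : (List.lookup "CMU ID" c0).getD "" ++ "_" ++ pyNormalize location ≠ "" := by
          intro he
          have := congrArg String.toList he
          simp only [String.toList_append] at this
          rcases List.append_eq_nil_iff.mp this with ⟨h1, -⟩
          rcases List.append_eq_nil_iff.mp h1 with ⟨-, h2⟩
          exact absurd h2 (by decide)
        simp only [hs, if_true, ne_eq, hc, not_false_eq_true, if_true, hid]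
        simp [pvLocOpen, pvLocMid, pvLocTail, pvLocClose, join_empty_cons, hj, String.append_assoc, String.append_empty]
        have m : ("</a>" : String) ++ "</strong> <span class=\"text-muted\">(" = "</a></strong> <span class=\"text-muted\">(" := rfl
        rw [sapp _ _ _ m]
    · have hnone : (List.lookup "CMU ID" c0).getD "" = "" := by
        cases hl : List.lookup "CMU ID" c0 with
        | none => rfl
        | some v => rw [hl] at hs; simp at hs
      simp only [hs, Bool.false_eq_true, if_false, hnone, ne_eq, not_true_eq_false]
      simp [pvLocOpen, pvLocMid, pvLocTail, pvLocClose, join_empty_cons, hj, String.append_assoc, String.append_empty]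

-- ===== VERDICT (by name: the statement is the Claim_ definition above) =====
theorem format_location_list_spec : Claim_equal_format_location_list := by
  intro locations components _
  unfold Spec_format_location_list format_location_list format_location_list_alt
  rw [show stepA components = fun h l => h ++ PySem.Str.join "" (locPartsB l ((groupsB components).getD l [])) from
        funext fun h => funext fun l => stepA_eq components h l]
  rw [foldl_append_join, join_empty_cons, join_empty_append, join_empty_flatMap]
  have hj1 : PySem.Str.join "" [pvPageClose] = pvPageClose := by
    rw [join_empty_cons]
    exact String.append_empty
  rw [hj1]
  simp [pvPageOpen, pvPageClose, String.append_assoc]
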